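-- pv_equiv track=rewrite | github.com/haitwang-cloud/leetCode_Python | non-decreasing-array.py | checkPossibility_1
-- ===== SOURCE A (Python) =====
-- def checkPossibility_1(nums):
--     """
--     :type nums: List[int]
--     :rtype: bool
--     """
--     modified, prev = False, nums[0]
--     for i in range(1, len(nums)):
--         if prev > nums[i]:
--             if modified:
--                 return False
--             elif i-2 < 0 or nums[i-2] <= nums[i]:
--                 prev = nums[i]
--             modified = True
--         else:
--             prev = nums[i]
--     return True
-- ===== SOURCE B (Python) =====
-- def checkPossibility_1(nums):
--     # fix-then-verify: apply the single greedy fix on a copy, then check sortedness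
--     a = list(nums)
--     for i in range(1, len(a)):
--         if a[i - 1] > a[i]:
--             if i < 2 or a[i - 2] <= a[i]:
--                 a[i - 1] = a[i]
--             else:
--                 a[i] = a[i - 1]
--             break
--     return all(a[i - 1] <= a[i] for i in range(1, len(a)))
-- ===== Notes on version B (the rewrite author's own statement) =====
-- stated objective: simpler
-- what changed: A's single stateful scan with a 'modified' flag and a virtual prev value is replaced by two plain passes: find the first violation and apply the greedy fix on a copy, then verify the copy is non-decreasing.
import Mathlib
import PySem

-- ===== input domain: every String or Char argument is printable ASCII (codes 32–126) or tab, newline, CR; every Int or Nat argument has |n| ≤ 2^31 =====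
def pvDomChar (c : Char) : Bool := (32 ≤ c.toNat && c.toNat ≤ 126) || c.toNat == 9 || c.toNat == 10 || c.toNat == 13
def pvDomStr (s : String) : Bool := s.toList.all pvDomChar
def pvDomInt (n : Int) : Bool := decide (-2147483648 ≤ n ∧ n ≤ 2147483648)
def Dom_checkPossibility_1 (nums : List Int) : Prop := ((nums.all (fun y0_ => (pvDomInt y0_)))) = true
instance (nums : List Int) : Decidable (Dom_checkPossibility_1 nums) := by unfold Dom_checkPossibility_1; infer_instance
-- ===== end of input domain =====

-- B differs from A only in decomposition (fix pass + verify pass on a copy); return values agree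
-- on every nonempty list. Neither port mutates its argument (Python B works on a copy).

-- ===== PORT A =====
-- the for-loop of A: state (modified, prev), index i over range(1, len(nums))
def goA (nums : List Int) (modified : Bool) (prev : Int) (i : Nat) : Bool :=
  if _h : i < nums.length then
    if prev > nums.getD i 0 then
      if modified then false
      else if i < 2 ∨ nums.getD (i - 2) 0 ≤ nums.getD i 0 then
        -- i-2 < 0 in Python ↔ i < 2 here (i ≥ 1 always)
        goA nums true (nums.getD i 0) (i + 1)
      else
        goA nums true prev (i + 1)
    else
      goA nums modified (nums.getD i 0) (i + 1)
  else true
termination_by nums.length - i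

def checkPossibility_1 (nums : List Int) : Bool :=
  match nums with
  | [] => true          -- Python A raises IndexError here (nums[0]); excluded by Pre_
  | h :: t => goA (h :: t) false h 1

-- ===== PORT B =====
-- B's first loop: find the first violation, apply the greedy fix, break
def findFix (a : List Int) (i : Nat) : List Int :=
  if _h : i < a.length then
    if a.getD (i - 1) 0 > a.getD i 0 then
      if i < 2 ∨ a.getD (i - 2) 0 ≤ a.getD i 0 then a.set (i - 1) (a.getD i 0)
      else a.set i (a.getD (i - 1) 0)
    else findFix a (i + 1)
  else a
termination_by a.length - i

-- B's verify pass: all(a[i-1] <= a[i] for i in range(1, len(a)))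
def chk (a : List Int) (i : Nat) : Bool :=
  if _h : i < a.length then decide (a.getD (i - 1) 0 ≤ a.getD i 0) && chk a (i + 1)
  else true
termination_by a.length - i

def checkPossibility_1_alt (nums : List Int) : Bool :=
  chk (findFix nums 1) 1

-- ===== PRECONDITION & SPEC =====
-- Pre_ excludes only the empty list, on which Python A raises IndexError (nums[0]).
def Pre_checkPossibility_1 (nums : List Int) : Prop := nums ≠ []
instance (nums : List Int) : Decidable (Pre_checkPossibility_1 nums) := by
  unfold Pre_checkPossibility_1; infer_instance

def pvWitness_checkPossibility_1 : List Int := [3, 4, 2, 3]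

def Spec_checkPossibility_1 (nums : List Int) (out : Bool) : Prop := out = checkPossibility_1_alt nums
instance (nums : List Int) (out : Bool) : Decidable (Spec_checkPossibility_1 nums out) := by unfold Spec_checkPossibility_1; infer_instance

-- ===== CLAIM (what is proved, stated in full; the proofs are below) =====
def Claim_equal_checkPossibility_1 : Prop := ∀ (nums : List Int), Dom_checkPossibility_1 nums → Pre_checkPossibility_1 nums → Spec_checkPossibility_1 nums (checkPossibility_1 nums)

-- ===== LEMMAS AND PROOFS =====

lemma getD_set (a : List Int) (i k : Nat) (v : Int) :
    (a.set i v).getD k 0 = if i = k ∧ i < a.length then v else a.getD k 0 := by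
  simp only [List.getD_eq_getElem?_getD, List.getElem?_set]
  split_ifs with h1 h2 h3 <;> simp_all; omega

lemma chk_iff (a : List Int) (i : Nat) :
    chk a i = true ↔ ∀ k, i ≤ k → k < a.length → a.getD (k - 1) 0 ≤ a.getD k 0 := by
  induction i using chk.induct a with
  | case1 i h ih =>
    rw [chk]
    simp only [h, dif_pos, Bool.and_eq_true, decide_eq_true_eq, ih]
    constructor
    · rintro ⟨h1, h2⟩ k hk hk2
      rcases eq_or_lt_of_le hk with rfl | hlt
      · exact h1
      · exact h2 k hlt hk2
    · intro hall
      exact ⟨hall i le_rfl h, fun k hk hk2 => hall k (by omega) hk2⟩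
  | case2 i h =>
    rw [chk]
    simp only [h, dif_neg, not_false_iff, true_iff]
    intro k _ hk2
    omega

-- after the fix, A's scan with modified=True and prev = the element at j-1 is the verify pass
lemma goA_true (a : List Int) : ∀ n j, a.length - j ≤ n → 1 ≤ j →
    goA a true (a.getD (j - 1) 0) j = chk a j := by
  intro n
  induction n with
  | zero =>
    intro j hn hj
    have h : ¬ j < a.length := by omega
    rw [goA, chk]
    simp [h]
  | succ n ih =>
    intro j hn hj
    by_cases h : j < a.length
    · rw [goA, chk, dif_pos h, dif_pos h]
      by_cases hv : a.getD (j - 1) 0 > a.getD j 0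
      · rw [if_pos hv, if_pos rfl, decide_eq_false (not_le.mpr hv), Bool.false_and]
      · rw [if_neg hv, decide_eq_true (not_lt.mp hv), Bool.true_and]
        have e : a.getD j 0 = a.getD ((j + 1) - 1) 0 := by simp
        rw [e, ih (j + 1) (by omega) (by omega)]
    · rw [goA, chk]
      simp [h]

-- A's scan with modified=True and an arbitrary prev: one comparison, then the verify pass
lemma goA_true_step (a : List Int) (j : Nat) (p : Int) (hj : 1 ≤ j) :
    goA a true p j = true ↔ (j < a.length → p ≤ a.getD j 0 ∧ chk a (j + 1) = true) := by
  rw [goA]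
  by_cases h : j < a.length
  · rw [dif_pos h]
    by_cases hv : p > a.getD j 0
    · rw [if_pos hv, if_pos rfl]
      constructor
      · intro h'
        exact absurd h' (by simp)
      · intro hX
        exact absurd (hX h).1 (not_le.mpr hv)
    · rw [if_neg hv]
      have e : a.getD j 0 = a.getD ((j + 1) - 1) 0 := by simp
      rw [e, goA_true a a.length (j + 1) (by omega) (by omega)]
      constructor
      · intro hc
        exact fun _ => ⟨not_lt.mp hv, hc⟩
      · intro hX
        exact (hX h).2
  · rw [dif_neg h]
    simp [h]

-- main invariant: while no violation has been seen, A's loop agrees with B's fix+verify on the suffix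
lemma clean (a : List Int) : ∀ n i, a.length - i ≤ n → 1 ≤ i →
    (∀ k, 1 ≤ k → k < i → k < a.length → a.getD (k - 1) 0 ≤ a.getD k 0) →
    goA a false (a.getD (i - 1) 0) i = chk (findFix a i) 1 := by
  intro n
  induction n with
  | zero =>
    intro i hn hi hpre
    have h : ¬ i < a.length := by omega
    rw [goA, findFix]
    simp only [h, dif_neg, not_false_iff]
    exact ((chk_iff a 1).mpr (fun k hk hk2 => hpre k hk (by omega) hk2)).symm
  | succ n ih =>
    intro i hn hi hpre
    by_cases h : i < a.length
    · rw [goA, findFix, dif_pos h, dif_pos h]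
      by_cases hv : a.getD (i - 1) 0 > a.getD i 0
      · rw [if_pos hv, if_pos hv]
        simp only [Bool.false_eq_true, if_false]
        by_cases hc : i < 2 ∨ a.getD (i - 2) 0 ≤ a.getD i 0
        · rw [if_pos hc, if_pos hc]
          have e : a.getD i 0 = a.getD ((i + 1) - 1) 0 := by simp
          rw [e, goA_true a a.length (i + 1) (by omega) (by omega)]
          rw [Bool.eq_iff_iff, chk_iff, chk_iff]
          have hi1 : i - 1 < a.length := by omega
          constructor
          · intro hP k hk1 hk2
            simp only [List.length_set] at hk2
            rw [getD_set, getD_set]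
            split_ifs with h1 h2 h2
            · exact le_refl _
            · have hk : k = i := by omega
              subst hk
              exact le_refl _
            · have hk : k = i - 1 := by omega
              subst hk
              have hi2 : ¬ i < 2 := by omega
              have := hc.resolve_left hi2
              simpa [show i - 1 - 1 = i - 2 by omega] using this
            · rcases Nat.lt_or_ge k i with hk | hk
              · exact hpre k hk1 (by omega) hk2
              · exact hP k (by omega) hk2
          · intro hP k hk1 hk2
            have := hP k (by omega) (by simpa using hk2)
            rw [getD_set, getD_set] at this
            rw [if_neg (by omega), if_neg (by omega)] at this
            simpa using this
        · have hi2 : ¬ i < 2 := fun h2 => hc (Or.inl h2)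
          rw [if_neg hc, if_neg hc]
          rw [Bool.eq_iff_iff, goA_true_step a (i + 1) _ (by omega),
            chk_iff a (i + 1 + 1), chk_iff (a.set i (a.getD (i - 1) 0)) 1]
          constructor
          · intro hstep k hk1 hk2
            simp only [List.length_set] at hk2
            rw [getD_set, getD_set]
            split_ifs with h1 h2 h2
            · omega
            · have hk : k = i + 1 := by omega
              subst hk
              exact (hstep (by omega)).1
            · have hk : k = i := by omega
              subst hk
              exact le_refl _
            · rcases Nat.lt_or_ge k i with hk | hk
              · exact hpre k hk1 (by omega) hk2
              · have hk2' : i + 1 < a.length := by omega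
                exact (hstep hk2').2 k (by omega) hk2
          · intro hP hlt
            constructor
            · have := hP (i + 1) (by omega) (by simpa using hlt)
              rw [getD_set, getD_set] at this
              rw [if_pos (by omega), if_neg (by omega)] at this
              simpa using this
            · intro k hk hk2
              have := hP k (by omega) (by simpa using hk2)
              rw [getD_set, getD_set] at this
              rw [if_neg (by omega), if_neg (by omega)] at this
              exact this
      · rw [if_neg hv, if_neg hv]
        have e : a.getD i 0 = a.getD ((i + 1) - 1) 0 := by simp
        rw [e]
        refine ih (i + 1) (by omega) (by omega) ?_
        intro k hk1 hk2 hk3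
        rcases Nat.lt_or_ge k i with hk | hk
        · exact hpre k hk1 hk hk3
        · have : k = i := by omega
          subst this
          exact not_lt.mp hv
    · rw [goA, findFix]
      simp only [h, dif_neg, not_false_iff]
      exact ((chk_iff a 1).mpr (fun k hk hk2 => hpre k hk (by omega) hk2)).symm

-- ===== VERDICT (by name: the statement is the Claim_ definition above) =====
theorem checkPossibility_1_spec : Claim_equal_checkPossibility_1 := by
  intro nums _ hpre
  unfold Spec_checkPossibility_1 checkPossibility_1 checkPossibility_1_alt
  match nums with
  | [] => exact absurd rfl hpre
  | h :: t =>
    have := clean (h :: t) ((h :: t).length - 1) 1 (le_refl _) (le_refl _)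
      (by intro k hk1 hk2 _; omega)
    simpa using this
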